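-- pv_equiv track=rewrite | github.com/ditthales/ListasIP | funcoes e escopo de variaveis/23.1L4Q5 - Mergulhão no Espaço.py | sao_multiplos
-- ===== SOURCE A (Python) =====
-- def separa_numeros(string):
--     string = string.lower()
--     numeros = []
--     numero_atual = ""
--     for letra in string:
--         if letra.isdigit():
--             numero_atual += letra
--         elif numero_atual:
--             numeros.append(int(numero_atual))
--             numero_atual = ""
--
--     if numero_atual:
--         numeros.append(int(numero_atual))
--
--     return numeros
--
-- def sao_multiplos(string):
--     numeros = separa_numeros(string)[::-1]
--     if len(numeros) != 0:
--         for passo in range(len(numeros) - 1):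
--             if numeros[passo] % numeros[-1] != 0:
--                 return False
--         return True
--     return False
-- ===== SOURCE B (Python) =====
-- def sao_multiplos(string):
--     # Single streaming pass: no number list is built and nothing is reversed.
--     # The first digit run becomes the divisor; every later run is tested
--     # immediately and we return False as soon as one is not divisible.
--     divisor = None
--     run = ""
--     for ch in string:
--         if ch.isdigit():
--             run += ch
--         else:
--             if run:
--                 n = int(run)
--                 if divisor is None:
--                     divisor = n
--                 elif n % divisor != 0:
--                     return False
--                 run = ""
--     if run:
--         n = int(run)
--         if divisor is None:
--             divisor = n
--         elif n % divisor != 0: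
--             return False
--     return divisor is not None
-- ===== Notes on version B (the rewrite author's own statement) =====
-- stated objective: alternative
-- what changed: B replaces A's two-phase design (lowercase the string, build the full list of parsed numbers, reverse it, then index-scan it against its last element) with one streaming pass that keeps only the first number as divisor and tests each later digit run immediately with an early False return; no list, no reversal, no lowercasing.
import Mathlib
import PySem

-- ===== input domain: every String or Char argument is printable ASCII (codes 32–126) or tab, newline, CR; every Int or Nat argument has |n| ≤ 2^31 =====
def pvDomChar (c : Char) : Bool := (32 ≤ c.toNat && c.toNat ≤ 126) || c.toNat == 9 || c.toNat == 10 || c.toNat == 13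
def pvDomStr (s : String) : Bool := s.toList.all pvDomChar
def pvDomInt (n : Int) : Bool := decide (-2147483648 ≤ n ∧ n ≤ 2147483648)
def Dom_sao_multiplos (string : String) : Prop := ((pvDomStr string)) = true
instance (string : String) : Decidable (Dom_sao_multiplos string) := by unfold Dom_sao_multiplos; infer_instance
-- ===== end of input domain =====

-- B is a single streaming pass (divisor + current run only, early False) instead of
-- A's lowercase/parse-into-a-list/reverse/index-scan pipeline; same return value on Pre_.

-- ===== PORT A =====
-- int(run) for a completed digit run; the run is always nonempty digits, so int() never fails
def runVal (run : List Char) : Int := (PySem.Int.ofChars? run).getD 0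

-- body of the parsing loop of separa_numeros
def sepFold (st : List Int × List Char) (c : Char) : List Int × List Char :=
  if PySem.Chars.isdigit c then (st.1, st.2 ++ [c])
  else if st.2 ≠ [] then (st.1 ++ [runVal st.2], [])
  else st

-- the trailing 'if numero_atual: numeros.append(int(numero_atual))'
def flushA (st : List Int × List Char) : List Int :=
  if st.2 ≠ [] then st.1 ++ [runVal st.2] else st.1

def separa_numeros (s : String) : List Int :=
  flushA ((PySem.Chars.lower s.toList).foldl sepFold ([], []))

-- A's 'for passo in range(len(numeros) - 1)' with its early 'return False'
def loopA (N : List Int) : List Int → Bool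
  | [] => true
  | i :: rest =>
      if PySem.Int.mod ((PySem.List.pyGet? N i).getD 0) ((PySem.List.pyGet? N (-1)).getD 0) ≠ 0
      then false else loopA N rest

def sao_multiplos (string : String) : Bool :=
  let numeros := (PySem.List.slice? (separa_numeros string) none none (-1)).getD []
  if PySem.List.len numeros ≠ 0 then
    loopA numeros (PySem.List.pyRange 0 (PySem.List.len numeros - 1) 1)
  else false

-- ===== PORT B =====
def altGo : List Char → Option Int → List Char → Bool
  | [], divisor, run =>
      (if run ≠ [] then
        match divisor with
        | none => true
        | some d => if PySem.Int.mod (runVal run) d ≠ 0 then false else true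
      else divisor.isSome)
  | c :: t, divisor, run =>
      if PySem.Chars.isdigit c then altGo t divisor (run ++ [c])
      else if run ≠ [] then
        match divisor with
        | none => altGo t (some (runVal run)) []
        | some d => if PySem.Int.mod (runVal run) d ≠ 0 then false else altGo t divisor []
      else altGo t divisor []

def sao_multiplos_alt (string : String) : Bool := altGo string.toList none []

-- ===== PRECONDITION & SPEC =====
-- the maximal digit runs of the string (spec-side helper for Pre_)
def digitRuns : List Char → List Char → List (List Char)
  | [], cur => if cur ≠ [] then [cur] else []
  | c :: t, cur =>
      if PySem.Chars.isdigit c then digitRuns t (cur ++ [c])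
      else if cur ≠ [] then cur :: digitRuns t [] else digitRuns t []

-- Pre_ excludes exactly the inputs where the Python raises ZeroDivisionError: at least two
-- digit runs and the first run all zeros (so the divisor, the first parsed number, is 0).
def Pre_sao_multiplos (string : String) : Prop :=
  ¬ (2 ≤ (digitRuns string.toList []).length ∧
     ((digitRuns string.toList []).head?.getD ['1']).all (· = '0') = true)
instance (string : String) : Decidable (Pre_sao_multiplos string) := by
  unfold Pre_sao_multiplos; infer_instance

def pvWitness_sao_multiplos : String := "12 4 6"

def Spec_sao_multiplos (string : String) (out : Bool) : Prop := out = sao_multiplos_alt string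
instance (string : String) (out : Bool) : Decidable (Spec_sao_multiplos string out) := by
  unfold Spec_sao_multiplos; infer_instance

-- ===== CLAIM (what is proved, stated in full; the proofs are below) =====
def Claim_equal_sao_multiplos : Prop := ∀ (string : String), Dom_sao_multiplos string → Pre_sao_multiplos string → Spec_sao_multiplos string (sao_multiplos string)

-- ===== LEMMAS AND PROOFS =====

-- both programs, reduced to the list of digit runs
def checkRuns : Option Int → List (List Char) → Bool
  | none, [] => false
  | some _, [] => true
  | none, r :: rs => checkRuns (some (runVal r)) rs
  | some d, r :: rs => if PySem.Int.mod (runVal r) d ≠ 0 then false else checkRuns (some d) rs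

theorem char_le_iff (a b : Char) : (a ≤ b) ↔ a.toNat ≤ b.toNat := by
  rw [Char.le_def, UInt32.le_iff_toNat_le]; rfl

theorem lowerChar_digit (c : Char) :
    PySem.Chars.isdigit (PySem.Chars.lowerChar c) = PySem.Chars.isdigit c := by
  simp only [PySem.Chars.lowerChar, PySem.Chars.isupper, PySem.Chars.isdigit]
  by_cases hu : ('A' ≤ c ∧ c ≤ 'Z')
  · have h0 := (char_le_iff 'A' c).mp hu.1
    have h1 := (char_le_iff c 'Z').mp hu.2
    simp only [show ('A').toNat = 65 by decide] at h0
    simp only [show ('Z').toNat = 90 by decide] at h1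
    have hval : (Char.ofNat (c.toNat + 32)).toNat = c.toNat + 32 := by
      simp [Char.toNat_ofNat, Nat.isValidChar]; omega
    simp only [hu.1, hu.2, decide_true, Bool.and_self, if_true]
    rw [show (decide ('0' ≤ Char.ofNat (c.toNat + 32)) && decide (Char.ofNat (c.toNat + 32) ≤ '9')) = false by
      simp only [Bool.and_eq_false_iff, decide_eq_false_iff_not, char_le_iff, hval]
      right; simp only [show ('9').toNat = 57 by decide]; omega]
    symm
    simp only [Bool.and_eq_false_iff, decide_eq_false_iff_not, char_le_iff]
    right; simp only [show ('9').toNat = 57 by decide]; omega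
  · have : (decide ('A' ≤ c) && decide (c ≤ 'Z')) = false := by
      rcases not_and_or.mp hu with h | h <;> simp [h]
    simp [this]

theorem lowerChar_of_digit (c : Char) (h : PySem.Chars.isdigit c = true) :
    PySem.Chars.lowerChar c = c := by
  simp only [PySem.Chars.isdigit, Bool.and_eq_true, decide_eq_true_eq, char_le_iff] at h
  simp only [PySem.Chars.lowerChar, PySem.Chars.isupper]
  have : ¬ ('A' ≤ c) := by
    rw [char_le_iff]; simp only [show ('A').toNat = 65 by decide]
    have := h.2; simp only [show ('9').toNat = 57 by decide] at this; omega
  simp [this]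

theorem sepFold_lower (st : List Int × List Char) (c : Char) :
    sepFold st (PySem.Chars.lowerChar c) = sepFold st c := by
  by_cases hd : PySem.Chars.isdigit c = true
  · rw [lowerChar_of_digit c hd]
  · simp only [sepFold, lowerChar_digit]
    simp [hd]

theorem sep_inv (l : List Char) : ∀ (acc : List Int) (cur : List Char),
    flushA (l.foldl sepFold (acc, cur)) = acc ++ (digitRuns l cur).map runVal := by
  induction l with
  | nil =>
      intro acc cur
      by_cases h : cur = [] <;> simp [flushA, digitRuns, h]
  | cons c t ih =>
      intro acc cur
      by_cases hd : PySem.Chars.isdigit c = true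
      · simp only [List.foldl_cons, sepFold, hd, if_true, digitRuns]
        exact ih acc (cur ++ [c])
      · by_cases hc : cur = []
        · simp [List.foldl_cons, sepFold, hd, hc, digitRuns, ih]
        · simp [List.foldl_cons, sepFold, hd, hc, digitRuns, ih]
  
theorem altGo_eq_check (l : List Char) : ∀ (divisor : Option Int) (run : List Char),
    altGo l divisor run = checkRuns divisor (digitRuns l run) := by
  induction l with
  | nil =>
      intro divisor run
      by_cases h : run = []
      · cases divisor <;> simp [altGo, digitRuns, h, checkRuns]
      · cases divisor <;> simp [altGo, digitRuns, h, checkRuns]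
  | cons c t ih =>
      intro divisor run
      by_cases hd : PySem.Chars.isdigit c = true
      · simp only [altGo, digitRuns, hd, if_true]; exact ih divisor (run ++ [c])
      · by_cases hr : run = []
        · simp [altGo, digitRuns, hd, hr, ih]
        · cases divisor <;> simp [altGo, digitRuns, hd, hr, ih, checkRuns]

theorem checkRuns_some (rs : List (List Char)) (d : Int) :
    checkRuns (some d) rs = rs.all (fun r => PySem.Int.mod (runVal r) d == 0) := by
  induction rs with
  | nil => simp [checkRuns]
  | cons r rest ih =>
      by_cases h : PySem.Int.mod (runVal r) d = 0 <;> simp [checkRuns, h, ih]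

theorem pyRange_one_nil (a b : Int) (h : b ≤ a) : PySem.List.pyRange a b 1 = [] := by
  simp [PySem.List.pyRange, show ¬ a < b by omega]

theorem loopA_eq (N : List Int) (k : Nat) : ∀ (a : Nat),
    (N.length : Int) - 1 = (a : Int) + (k : Int) →
    loopA N (PySem.List.pyRange (a : Int) ((N.length : Int) - 1) 1) =
      (N.dropLast.drop a).all
        (fun x => PySem.Int.mod x ((PySem.List.pyGet? N (-1)).getD 0) == 0) := by
  induction k with
  | zero =>
      intro a ha
      have hdl : N.dropLast.length = N.length - 1 := List.length_dropLast
      have hempty : PySem.List.pyRange (a : Int) ((N.length : Int) - 1) 1 = [] :=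
        pyRange_one_nil _ _ (by omega)
      have hdrop : N.dropLast.drop a = [] := List.drop_eq_nil_of_le (by omega)
      rw [hempty, hdrop]
      simp [loopA]
  | succ k ih =>
      intro a ha
      have hdl : N.dropLast.length = N.length - 1 := List.length_dropLast
      have hlt : (a : Int) < (N.length : Int) - 1 := by omega
      rw [PySem.List.pyRange_one_cons hlt]
      have haN : a < N.length := by omega
      have haD : a < N.dropLast.length := by omega
      simp only [loopA, PySem.List.pyGet?_natCast]
      have hget : N[a]?.getD 0 = N[a] := by simp [List.getElem?_eq_getElem haN]
      rw [hget]
      have hdrop : N.dropLast.drop a = N.dropLast[a] :: N.dropLast.drop (a + 1) :=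
        List.drop_eq_getElem_cons haD
      have hDa : N.dropLast[a] = N[a] := List.getElem_dropLast haD
      have hrec := ih (a + 1) (by push_cast; omega)
      push_cast at hrec ⊢
      rw [hdrop, hrec]
      by_cases h : PySem.Int.mod N[a] ((PySem.List.pyGet? N (-1)).getD 0) = 0
      · simp [h, hDa]
      · simp [h, hDa]

theorem separa_eq (s : String) :
    separa_numeros s = (digitRuns s.toList []).map runVal := by
  unfold separa_numeros
  rw [show PySem.Chars.lower s.toList = s.toList.map PySem.Chars.lowerChar from rfl]
  rw [List.foldl_map]
  rw [PySem.List.foldl_congr_mem s.toList (fun st c => sepFold st (PySem.Chars.lowerChar c))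
    sepFold ([], []) (fun acc x _ => sepFold_lower acc x)]
  exact sep_inv s.toList [] []

-- ===== VERDICT (by name: the statement is the Claim_ definition above) =====
theorem sao_multiplos_spec : Claim_equal_sao_multiplos := by
  intro s _dom _pre
  unfold Spec_sao_multiplos sao_multiplos sao_multiplos_alt
  rw [separa_eq, altGo_eq_check, PySem.List.slice?_none_none_neg_one]
  simp only [Option.getD_some, PySem.List.len_eq]
  cases hR : digitRuns s.toList [] with
  | nil => simp [checkRuns]
  | cons r rest =>
      have hne : (((r :: rest).map runVal).reverse).length ≠ 0 := by simp
      rw [if_pos (by exact_mod_cast Int.natCast_ne_zero.mpr hne)]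
      have h0 := loopA_eq (((r :: rest).map runVal).reverse) rest.length 0 (by simp)
      rw [Nat.cast_zero] at h0
      rw [h0]
      simp only [List.drop_zero, List.dropLast_reverse, List.all_reverse,
        PySem.List.pyGet?_neg_one, List.getLast?_reverse, List.map_cons, List.head?_cons,
        Option.getD_some, List.tail_cons, List.all_map, checkRuns, checkRuns_some]
      rfl
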